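-- pv_equiv track=rewrite | github.com/Saladcodes/hydrocracker-predictive-monitoring | src/ofm_fg_ofm/config/tag_renaming.py | build_column_rename_map
-- ===== SOURCE A (Python) =====
-- from typing import Dict, Tuple
--
-- def build_column_rename_map(columns, tag_map: Dict[str, str]) -> Dict[str, str]:
--     rename: Dict[str, str] = {}
--     for col in columns:
--         for tag, friendly in tag_map.items():
--             if col == tag or col.startswith(tag + "_"):
--                 rename[col] = friendly + col[len(tag):]  # preserves suffix like _lag1/_roc
--                 break
--     return rename
-- ===== SOURCE B (Python) =====
-- def build_column_rename_map(columns, tag_map):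
--     # Index every tag by its insertion position once, then resolve each column
--     # by probing only its underscore-boundary prefixes (min position wins).
--     index = {}
--     for i, (tag, friendly) in enumerate(tag_map.items()):
--         index[tag] = (i, friendly)
--     rename = {}
--     for col in columns:
--         best = None  # (position, friendly, cut)
--         for cut in range(len(col) + 1):
--             if cut == len(col) or col[cut] == "_":
--                 hit = index.get(col[:cut])
--                 if hit is not None and (best is None or hit[0] < best[0]):
--                     best = (hit[0], hit[1], cut)
--         if best is not None:
--             rename[col] = best[1] + col[best[2]:]
--     return rename
-- ===== Notes on version B (the rewrite author's own statement) =====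
-- stated objective: faster
-- what changed: Instead of scanning the whole tag_map for every column, B builds a tag->(position,friendly) index once and, per column, probes only the column's underscore-boundary prefixes, keeping the match with the smallest insertion position (exactly A's first-match-in-dict-order winner).
import Mathlib
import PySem

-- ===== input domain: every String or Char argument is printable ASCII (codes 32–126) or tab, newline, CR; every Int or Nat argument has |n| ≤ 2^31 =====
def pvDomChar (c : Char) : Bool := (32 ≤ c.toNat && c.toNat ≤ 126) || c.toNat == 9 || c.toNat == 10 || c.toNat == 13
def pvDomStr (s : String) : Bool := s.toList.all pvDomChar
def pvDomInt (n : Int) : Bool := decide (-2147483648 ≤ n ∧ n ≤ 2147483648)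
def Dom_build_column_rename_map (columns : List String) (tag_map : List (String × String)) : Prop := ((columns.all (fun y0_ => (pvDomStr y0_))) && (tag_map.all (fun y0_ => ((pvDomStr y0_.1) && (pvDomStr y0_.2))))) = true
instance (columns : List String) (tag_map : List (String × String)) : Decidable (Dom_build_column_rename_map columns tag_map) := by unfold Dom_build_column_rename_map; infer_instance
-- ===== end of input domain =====

-- B replaces A's per-column scan of tag_map by a one-time tag index probed only at each
-- column's underscore-boundary prefixes (min insertion position wins): asymptotically faster.


-- ===== PORT A =====
-- inner 'for tag, friendly in tag_map.items(): … break' loop of A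
def pvInnerA (rename : PySem.Dict String String) (col : String) : List (String × String) → PySem.Dict String String
  | [] => rename
  | (tag, friendly) :: rest =>
    if col == tag || PySem.Str.startswith col (tag ++ "_") then
      rename.insert col (friendly ++ PySem.Str.slice col (some (PySem.Str.len tag)) none)
    else pvInnerA rename col rest

def build_column_rename_map (columns : List String) (tag_map : List (String × String)) : List (String × String) :=
  (columns.foldl (fun rename col => pvInnerA rename col tag_map) PySem.Dict.empty).items

-- ===== PORT B =====
-- index = {tag: (i, friendly) for i, (tag, friendly) in enumerate(tag_map.items())}
def pvIndexB (tag_map : List (String × String)) : PySem.Dict String (Int × String) :=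
  (PySem.List.enumerate tag_map 0).foldl (fun d p => d.insert p.2.1 (p.1, p.2.2)) PySem.Dict.empty

-- body of B's 'for cut in range(len(col) + 1)' loop
def pvStepB (index : PySem.Dict String (Int × String)) (col : String)
    (best : Option (Int × String × Int)) (cut : Int) : Option (Int × String × Int) :=
  if cut = PySem.Str.len col ∨ PySem.Str.pyGet? col cut = some '_' then
    match index.get? (PySem.Str.slice col none (some cut)), best with
    | some (i, f), none => some (i, f, cut)
    | some (i, f), some (bi, bf, bc) => if i < bi then some (i, f, cut) else some (bi, bf, bc)
    | none, _ => best
  else best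

def pvBestB (index : PySem.Dict String (Int × String)) (col : String) : Option (Int × String × Int) :=
  (PySem.List.pyRange 0 (PySem.Str.len col + 1) 1).foldl (pvStepB index col) none

def build_column_rename_map_alt (columns : List String) (tag_map : List (String × String)) : List (String × String) :=
  let index := pvIndexB tag_map
  (columns.foldl (fun rename col =>
      match pvBestB index col with
      | none => rename
      | some (_, f, cut) => rename.insert col (f ++ PySem.Str.slice col (some cut) none))
    PySem.Dict.empty).items

-- ===== PRECONDITION & SPEC =====
-- Pre_ requires the keys of tag_map to be pairwise distinct: tag_map is a Python dict,
-- so an association list with duplicate keys represents no actual Python input.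
def Pre_build_column_rename_map (columns : List String) (tag_map : List (String × String)) : Prop :=
  (tag_map.map Prod.fst).Nodup
instance (columns : List String) (tag_map : List (String × String)) : Decidable (Pre_build_column_rename_map columns tag_map) := by unfold Pre_build_column_rename_map; infer_instance

def pvWitness_build_column_rename_map : List String × (List (String × String)) :=
  (["a_x", "b", "c"], [("a", "TagA"), ("b", "TagB")])

def Spec_build_column_rename_map (columns : List String) (tag_map : List (String × String)) (out : List (String × String)) : Prop := out = build_column_rename_map_alt columns tag_map
instance (columns : List String) (tag_map : List (String × String)) (out : List (String × String)) : Decidable (Spec_build_column_rename_map columns tag_map out) := by unfold Spec_build_column_rename_map; infer_instance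

-- ===== CLAIM (what is proved, stated in full; the proofs are below) =====
def Claim_equal_build_column_rename_map : Prop := ∀ (columns : List String) (tag_map : List (String × String)), Dom_build_column_rename_map columns tag_map → Pre_build_column_rename_map columns tag_map → Spec_build_column_rename_map columns tag_map (build_column_rename_map columns tag_map)

-- ===== LEMMAS AND PROOFS =====

-- the Bool test of A's inner loop
def pvMatch (col tag : String) : Bool := col == tag || PySem.Str.startswith col (tag ++ "_")

-- B's per-cut candidate: the hit recorded at a given cut, if any
def pvHit (index : PySem.Dict String (Int × String)) (col : String) (cut : Int) :
    Option (Int × String × Int) :=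
  if cut = PySem.Str.len col ∨ PySem.Str.pyGet? col cut = some '_' then
    (index.get? (PySem.Str.slice col none (some cut))).map (fun q => (q.1, q.2, cut))
  else none

-- keep-the-smaller-first-component step
def pvMinStep (best : Option (Int × String × Int)) (x : Int × String × Int) :
    Option (Int × String × Int) :=
  match best with
  | none => some x
  | some b => if x.1 < b.1 then some x else some b

theorem pvPrefixAppendSingleton {s c : List Char} {a : Char} :
    (s ++ [a]) <+: c ↔ s <+: c ∧ (c)[s.length]? = some a := by
  constructor
  · rintro ⟨u, rfl⟩
    refine ⟨⟨[a] ++ u, by simp⟩, ?_⟩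
    rw [List.append_assoc]
    rw [List.getElem?_append_right (by omega)]
    simp
  · rintro ⟨⟨v, rfl⟩, h⟩
    rw [List.getElem?_append_right (by omega)] at h
    simp only [Nat.sub_self] at h
    obtain ⟨w, rfl⟩ : ∃ w, v = a :: w := by
      cases v with
      | nil => simp at h
      | cons b w => simp at h; exact ⟨w, by rw [h]⟩
    exact ⟨w, by simp⟩

theorem pvMatch_iff (col t : String) :
    pvMatch col t = true ↔
      ((t.toList.length : Int) ≤ PySem.Str.len col ∧
        ((t.toList.length : Int) = PySem.Str.len col ∨
          PySem.Str.pyGet? col (t.toList.length : Int) = some '_') ∧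
        PySem.Str.slice col none (some (t.toList.length : Int)) = t) := by
  have hlen : PySem.Str.len col = (col.toList.length : Int) := PySem.Str.len_eq col
  have hund : ("_" : String).toList = ['_'] := by decide
  constructor
  · intro h
    have h' : (col == t) = true ∨ PySem.Str.startswith col (t ++ "_") = true := by
      simpa [pvMatch] using h
    rcases h' with hbeq | hsw
    · have hct : col = t := by simpa using hbeq
      subst hct
      refine ⟨by rw [hlen], Or.inl (by rw [hlen]), ?_⟩
      rw [← String.toList_inj, PySem.Str.toList_slice, PySem.Chars.slice_eq_listSlice,
        PySem.List.slice_to_natCast, List.take_length]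
    · rw [PySem.Str.startswith_eq, PySem.Chars.startswith_iff, String.toList_append, hund] at hsw
      obtain ⟨hpre, hget⟩ := pvPrefixAppendSingleton.mp hsw
      have hlt : t.toList.length < col.toList.length := by
        obtain ⟨h', -⟩ := List.getElem?_eq_some_iff.mp hget
        exact h'
      refine ⟨by rw [hlen]; omega, Or.inr ?_, ?_⟩
      · rw [PySem.Str.pyGet?_natCast]; exact hget
      · rw [← String.toList_inj, PySem.Str.toList_slice, PySem.Chars.slice_eq_listSlice,
          PySem.List.slice_to_natCast]
        exact (List.prefix_iff_eq_take.mp hpre).symm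
  · rintro ⟨h1, h2, h3⟩
    rw [← String.toList_inj, PySem.Str.toList_slice, PySem.Chars.slice_eq_listSlice,
      PySem.List.slice_to_natCast] at h3
    rcases h2 with heq | hget
    · rw [hlen] at heq
      have hle : col.toList.length ≤ t.toList.length := by omega
      rw [List.take_of_length_le hle] at h3
      have : col = t := String.toList_inj.mp h3
      subst this
      simp [pvMatch]
    · suffices hsw : PySem.Str.startswith col (t ++ "_") = true by
        simp only [pvMatch, hsw, Bool.or_true]
      rw [PySem.Str.startswith_eq, PySem.Chars.startswith_iff, String.toList_append, hund]
      apply pvPrefixAppendSingleton.mpr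
      constructor
      · rw [← h3]; exact List.take_prefix _ _
      · rw [PySem.Str.pyGet?_natCast] at hget; exact hget
  

theorem pvSliceLen (col : String) (cut : Int) (h0 : 0 ≤ cut) (h1 : cut ≤ PySem.Str.len col) :
    ((PySem.Str.slice col none (some cut)).toList.length : Int) = cut := by
  rw [PySem.Str.toList_slice, PySem.Chars.slice_eq_listSlice, PySem.List.slice_to _ h0]
  rw [PySem.Str.len_eq] at h1
  simp only [List.length_take]
  omega

theorem pvInnerA_eq_find (rename : PySem.Dict String String) (col : String)
    (tm : List (String × String)) :
    pvInnerA rename col tm =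
      match tm.find? (fun p => pvMatch col p.1) with
      | none => rename
      | some (t, f) =>
        rename.insert col (f ++ PySem.Str.slice col (some (PySem.Str.len t)) none) := by
  induction tm with
  | nil => rfl
  | cons p rest ih =>
    obtain ⟨t, f⟩ := p
    by_cases h : (col == t || PySem.Str.startswith col (t ++ "_")) = true
    · rw [pvInnerA, if_pos h, List.find?_cons_of_pos (by simpa [pvMatch] using h)]
    · rw [pvInnerA, if_neg h, List.find?_cons_of_neg (by simpa [pvMatch] using h), ih]

theorem pvEnumLB {α : Type} {xs : List α} {s : Int} {q : Int × α}
    (h : q ∈ PySem.List.enumerate xs s) : s ≤ q.1 := by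
  rw [PySem.List.mem_enumerate_iff] at h
  obtain ⟨k, hk, rfl⟩ := h
  simp

theorem pvEnumInj {α : Type} {xs : List α} {s : Int} {p q : Int × α}
    (hp : p ∈ PySem.List.enumerate xs s) (hq : q ∈ PySem.List.enumerate xs s)
    (h : p.1 = q.1) : p = q := by
  rw [PySem.List.mem_enumerate_iff] at hp hq
  obtain ⟨k, hk, rfl⟩ := hp
  obtain ⟨k', hk', rfl⟩ := hq
  have hkk : k = k' := by simpa using h
  subst hkk
  rfl

theorem pvMemEnumSnd {α : Type} {xs : List α} {s : Int} {q : Int × α}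
    (h : q ∈ PySem.List.enumerate xs s) : q.2 ∈ xs := by
  rw [PySem.List.mem_enumerate_iff] at h
  obtain ⟨k, hk, rfl⟩ := h
  simp

theorem pvFindMin {α : Type} (pred : α → Bool) (x : α) :
    ∀ (tm : List α) (s : Int), List.find? pred tm = some x →
      ∃ i, (i, x) ∈ PySem.List.enumerate tm s ∧
        ∀ q ∈ PySem.List.enumerate tm s, pred q.2 = true → i ≤ q.1 := by
  intro tm
  induction tm with
  | nil => intro s h; simp at h
  | cons p rest ih =>
    intro s h
    by_cases hp : pred p = true
    · rw [List.find?_cons_of_pos hp] at h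
      obtain rfl : p = x := by injection h
      refine ⟨s, by simp [PySem.List.enumerate_cons], ?_⟩
      intro q hq _
      rw [PySem.List.enumerate_cons] at hq
      rcases List.mem_cons.mp hq with rfl | hq
      · exact le_refl s
      · have := pvEnumLB hq; omega
    · rw [List.find?_cons_of_neg hp] at h
      obtain ⟨i, hmem, hmin⟩ := ih (s + 1) h
      refine ⟨i, by rw [PySem.List.enumerate_cons]; exact List.mem_cons_of_mem _ hmem, ?_⟩
      intro q hq hq2
      rw [PySem.List.enumerate_cons] at hq
      rcases List.mem_cons.mp hq with rfl | hq
      · simp at hq2; exact absurd hq2 hp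
      · exact hmin q hq hq2

theorem pvIndexGet (tm : List (String × String)) (hnd : (tm.map Prod.fst).Nodup)
    (t : String) (q : Int × String) :
    (pvIndexB tm).get? t = some q ↔ (q.1, (t, q.2)) ∈ PySem.List.enumerate tm 0 := by
  have hmapkey : (PySem.List.enumerate tm 0).map (fun p => p.2.1) = tm.map Prod.fst := by
    have h1 : (fun (p : Int × String × String) => p.2.1) =
        (Prod.fst ∘ fun (p : Int × String × String) => p.2) := rfl
    rw [h1, ← List.map_map, PySem.List.map_snd_enumerate]
  have hkeys : (pvIndexB tm).keys.Nodup := by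
    unfold pvIndexB
    exact PySem.Dict.nodup_keys_foldl_insert_key (PySem.List.enumerate tm 0)
      (fun p => p.2.1) (fun _ p => (p.1, p.2.2)) PySem.Dict.empty
      (by rw [PySem.Dict.keys_empty]; exact List.nodup_nil)
  have hitems : (pvIndexB tm).items =
      (PySem.List.enumerate tm 0).map (fun p => (p.2.1, (p.1, p.2.2))) := by
    unfold pvIndexB
    rw [PySem.Dict.items_foldl_insert_fresh (PySem.List.enumerate tm 0)
      (fun p => p.2.1) (fun p => (p.1, p.2.2)) PySem.Dict.empty
      (fun a _ => PySem.Dict.contains_empty _) (by rw [hmapkey]; exact hnd)]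
    simp [PySem.Dict.empty]
  rw [PySem.Dict.get?_eq_some_iff_mem_items _ _ _ hkeys, hitems]
  constructor
  · intro hm
    obtain ⟨p, hp, hpe⟩ := List.mem_map.mp hm
    obtain ⟨i, pt, pf⟩ := p
    obtain ⟨qi, qf⟩ := q
    simp only [Prod.mk.injEq] at hpe
    obtain ⟨rfl, rfl, rfl⟩ := hpe
    exact hp
  · intro hm
    exact List.mem_map.mpr ⟨(q.1, (t, q.2)), hm, rfl⟩

theorem pvFoldBody (index : PySem.Dict String (Int × String)) (col : String)
    (L : List Int) (acc : Option (Int × String × Int)) :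
    L.foldl (pvStepB index col) acc =
      (L.filterMap (pvHit index col)).foldl pvMinStep acc := by
  have hstep : ∀ acc cut, pvStepB index col acc cut =
      match pvHit index col cut with
      | none => acc
      | some x => pvMinStep acc x := by
    intro acc cut
    unfold pvStepB pvHit pvMinStep
    split_ifs with hb
    · cases hg : index.get? (PySem.Str.slice col none (some cut)) with
      | none => cases acc <;> simp
      | some q =>
        obtain ⟨i, f⟩ := q
        cases acc with
        | none => simp
        | some b => obtain ⟨bi, bf, bc⟩ := b; simp
    · rfl
  induction L generalizing acc with
  | nil => rfl
  | cons cut L ih =>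
    rw [List.foldl_cons, List.filterMap_cons, hstep]
    cases h : pvHit index col cut with
    | none => exact ih acc
    | some x => rw [List.foldl_cons]; exact ih (pvMinStep acc x)

theorem pvMinFoldSome (x : Int × String × Int) :
    ∀ (l : List (Int × String × Int)) (acc : Option (Int × String × Int)),
      (x ∈ l ∨ acc = some x) →
      (∀ y ∈ l, x.1 ≤ y.1 ∧ (y.1 = x.1 → y = x)) →
      (∀ b, acc = some b → x.1 ≤ b.1 ∧ (b.1 = x.1 → b = x)) →
      l.foldl pvMinStep acc = some x := by
  intro l
  induction l with
  | nil =>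
    intro acc h1 _ _
    rcases h1 with h | h
    · simp at h
    · simpa using h
  | cons y l ih =>
    intro acc h1 h2 h3
    rw [List.foldl_cons]
    have hy := h2 y (by simp)
    apply ih
    · rcases h1 with hmem | hacc
      · rcases List.mem_cons.mp hmem with rfl | hmem'
        · right
          unfold pvMinStep
          cases acc with
          | none => rfl
          | some b =>
            have hb := h3 b rfl
            dsimp only
            split_ifs with hlt
            · rfl
            · rw [hb.2 (by have := hb.1; omega)]
        · left; exact hmem'
      · right
        unfold pvMinStep
        rw [hacc]
        dsimp only
        split_ifs with hlt
        · exfalso; have := hy.1; omega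
        · rfl
    · intro z hz; exact h2 z (List.mem_cons_of_mem _ hz)
    · intro b hb
      unfold pvMinStep at hb
      cases acc with
      | none => injection hb with hb'; rw [← hb']; exact hy
      | some b0 =>
        have hb0 := h3 b0 rfl
        dsimp only at hb
        split_ifs at hb with hlt <;> (injection hb with hb'; rw [← hb'])
        · exact hy
        · exact hb0

theorem pvColStep (tm : List (String × String)) (hnd : (tm.map Prod.fst).Nodup)
    (col : String) (rename : PySem.Dict String String) :
    pvInnerA rename col tm =
      match pvBestB (pvIndexB tm) col with
      | none => rename
      | some (_, f, cut) => rename.insert col (f ++ PySem.Str.slice col (some cut) none) := by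
  rw [pvInnerA_eq_find]
  have hlen : PySem.Str.len col = (col.toList.length : Int) := PySem.Str.len_eq col
  cases hfind : List.find? (fun p => pvMatch col p.1) tm with
  | none =>
    have hnone : ∀ cut ∈ PySem.List.pyRange 0 (PySem.Str.len col + 1) 1,
        pvHit (pvIndexB tm) col cut = none := by
      intro cut hcut
      rw [PySem.List.mem_pyRange_one] at hcut
      unfold pvHit
      split_ifs with hb
      · cases hg : (pvIndexB tm).get? (PySem.Str.slice col none (some cut)) with
        | none => rfl
        | some q =>
          exfalso
          rw [pvIndexGet tm hnd] at hg
          have hmem : (PySem.Str.slice col none (some cut), q.2) ∈ tm := pvMemEnumSnd hg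
          have hsl := pvSliceLen col cut (by omega) (by rw [hlen]; omega)
          have hmatch : pvMatch col (PySem.Str.slice col none (some cut)) = true := by
            rw [pvMatch_iff, hsl]
            exact ⟨by rw [hlen]; omega, hb, rfl⟩
          have := List.find?_eq_none.mp hfind _ hmem
          simp [hmatch] at this
      · rfl
    have hB : pvBestB (pvIndexB tm) col = none := by
      unfold pvBestB
      rw [pvFoldBody, List.filterMap_eq_nil_iff.mpr hnone]
      rfl
    rw [hB]
  | some tf =>
    obtain ⟨t, f⟩ := tf
    have hpred : pvMatch col t = true := by simpa using List.find?_some hfind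
    obtain ⟨i, hmem, hmin⟩ := pvFindMin (fun p => pvMatch col p.1) (t, f) tm 0 hfind
    obtain ⟨hle, hbd, hsl⟩ := (pvMatch_iff col t).mp hpred
    have hgx : (pvIndexB tm).get? t = some (i, f) := (pvIndexGet tm hnd t (i, f)).mpr hmem
    have hxhit : pvHit (pvIndexB tm) col ((t.toList.length : Int)) =
        some (i, f, (t.toList.length : Int)) := by
      unfold pvHit
      rw [if_pos (by rw [hlen] at hbd ⊢; exact hbd), hsl, hgx]
      rfl
    have hxmem : (i, f, (t.toList.length : Int)) ∈
        (PySem.List.pyRange 0 (PySem.Str.len col + 1) 1).filterMap (pvHit (pvIndexB tm) col) :=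
      List.mem_filterMap.mpr ⟨(t.toList.length : Int),
        by rw [PySem.List.mem_pyRange_one]
           exact ⟨by omega, by rw [hlen] at hle; omega⟩,
        hxhit⟩
    have hminall : ∀ y ∈ (PySem.List.pyRange 0 (PySem.Str.len col + 1) 1).filterMap
        (pvHit (pvIndexB tm) col),
        (i, f, (t.toList.length : Int)).1 ≤ y.1 ∧
          (y.1 = (i, f, (t.toList.length : Int)).1 → y = (i, f, (t.toList.length : Int))) := by
      intro y hy
      obtain ⟨cut, hcut, hyhit⟩ := List.mem_filterMap.mp hy
      rw [PySem.List.mem_pyRange_one] at hcut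
      unfold pvHit at hyhit
      split_ifs at hyhit with hb
      · cases hg : (pvIndexB tm).get? (PySem.Str.slice col none (some cut)) with
        | none => rw [hg] at hyhit; simp at hyhit
        | some q =>
          rw [hg] at hyhit
          simp only [Option.map_some, Option.some.injEq] at hyhit
          rw [pvIndexGet tm hnd] at hg
          have hsl' := pvSliceLen col cut (by omega) (by rw [hlen]; omega)
          have hmatch' : pvMatch col (PySem.Str.slice col none (some cut)) = true := by
            rw [pvMatch_iff, hsl']
            exact ⟨by rw [hlen]; omega, hb, rfl⟩
          have hle' : i ≤ q.1 := hmin _ hg (by simpa using hmatch')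
          subst hyhit
          refine ⟨hle', ?_⟩
          intro heq
          have hpq := pvEnumInj hg hmem (by simpa using heq)
          simp only [Prod.mk.injEq] at hpq
          obtain ⟨hq1, hqt, hq2⟩ := hpq
          rw [hqt] at hsl'
          simp only [Prod.mk.injEq]
          exact ⟨hq1, hq2, by omega⟩
    have hB : pvBestB (pvIndexB tm) col = some (i, f, (t.toList.length : Int)) := by
      unfold pvBestB
      rw [pvFoldBody]
      exact pvMinFoldSome _ _ _ (Or.inl hxmem) hminall (fun b hb => by cases hb)
    rw [hB]
    dsimp only
    rw [PySem.Str.len_eq]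


-- ===== VERDICT (by name: the statement is the Claim_ definition above) =====
theorem build_column_rename_map_spec : Claim_equal_build_column_rename_map := by
  intro columns tag_map hdom hpre
  have hnd : (tag_map.map Prod.fst).Nodup := hpre
  clear hdom hpre
  unfold Spec_build_column_rename_map build_column_rename_map build_column_rename_map_alt
  have h : ∀ (d : PySem.Dict String String),
      columns.foldl (fun rename col => pvInnerA rename col tag_map) d =
      columns.foldl (fun rename col =>
        match pvBestB (pvIndexB tag_map) col with
        | none => rename
        | some (_, f, cut) => rename.insert col (f ++ PySem.Str.slice col (some cut) none)) d := by
    induction columns with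
    | nil => intro d; rfl
    | cons c cs ih =>
      intro d
      simp only [List.foldl_cons]
      rw [pvColStep tag_map hnd c d, ih]
  rw [h]
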